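-- pv_equiv track=rewrite | github.com/razzaqali778/dsa-depth | stack/python/reverse_some_chars.py | reverse_some_chars
-- ===== SOURCE A (Python) =====
-- from typing import Iterable
--
-- def reverse_some_chars(s: str, chars: Iterable[str]) -> str:
--     target_set = set(chars)
--     stack = [ch for ch in s if ch in target_set]
--
--     result = []
--     for ch in s:
--         if ch in target_set:
--             result.append(stack.pop())
--         else:
--             result.append(ch)
--     return ''.join(result)
-- ===== SOURCE B (Python) =====
-- def reverse_some_chars(s, chars):
--     target_set = set(chars)
--     lst = list(s)
--     left, right = 0, len(lst) - 1
--     while left < right: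
--         if lst[left] not in target_set:
--             left += 1
--         elif lst[right] not in target_set:
--             right -= 1
--         else:
--             lst[left], lst[right] = lst[right], lst[left]
--             left += 1
--             right -= 1
--     return ''.join(lst)
-- ===== Notes on version B (the rewrite author's own statement) =====
-- stated objective: alternative
-- what changed: Replaces A's auxiliary stack of target characters plus a second forward rebuild pass by an in-place two-pointer sweep that swaps target characters inward, so no stack or result list is built.
import Mathlib
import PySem

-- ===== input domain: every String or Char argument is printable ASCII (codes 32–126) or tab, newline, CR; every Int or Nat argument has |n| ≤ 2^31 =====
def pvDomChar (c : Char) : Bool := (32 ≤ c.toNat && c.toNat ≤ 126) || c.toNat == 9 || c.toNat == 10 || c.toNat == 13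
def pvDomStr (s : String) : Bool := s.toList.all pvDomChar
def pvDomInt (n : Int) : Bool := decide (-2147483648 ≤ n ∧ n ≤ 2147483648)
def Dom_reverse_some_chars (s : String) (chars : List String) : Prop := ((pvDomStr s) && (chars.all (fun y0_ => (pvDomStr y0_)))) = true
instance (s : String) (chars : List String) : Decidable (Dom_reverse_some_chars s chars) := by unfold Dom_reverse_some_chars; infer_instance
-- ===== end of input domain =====

-- B replaces A's collect-the-targets stack plus forward rebuild by an in-place two-pointer
-- swap of the target characters (alternative algorithm, same O(n) cost, no auxiliary stack).

-- ===== PORT A =====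
-- 'ch in target_set' for a character ch of s (membership in set(chars) of a 1-char string)
def pvTargetP (chars : List String) (c : Char) : Bool :=
  PySem.Set.contains (PySem.Set.ofList chars) (String.ofList [c])

-- the 'for ch in s' loop of A: pop from the end of the stack at each target character.
-- 'stack.pop()' on an empty stack would raise in Python but is unreachable (the stack holds
-- exactly the target characters of s); the 'none' branch is only a totality guard.
def pvGoA (P : Char → Bool) : List Char → List Char → List Char
  | [], _ => []
  | c :: cs, st =>
    if P c then
      match PySem.List.pop? st with
      | some (v, st') => v :: pvGoA P cs st'
      | none => pvGoA P cs st
    else c :: pvGoA P cs st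

def reverse_some_chars (s : String) (chars : List String) : String :=
  -- stack = [ch for ch in s if ch in target_set]; then the for-loop over s
  String.ofList (pvGoA (pvTargetP chars) s.toList (s.toList.filter (pvTargetP chars)))

-- ===== PORT B =====
-- B's while-loop. left/right are only dereferenced while 0 ≤ left < right ≤ len-1, and
-- 'right = len-1' is negative only for the empty string, where the loop body never runs
-- (0 < 0-1 is false for Python's -1 and for Nat's 0 alike); so Nat indices with
-- List.getD/List.set are exact here.
def pvGoB (P : Char → Bool) (arr : List Char) (l r : Nat) : List Char :=
  if h : l < r then
    if ¬ P (arr.getD l ' ') then pvGoB P arr (l + 1) r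
    else if ¬ P (arr.getD r ' ') then pvGoB P arr l (r - 1)
    else pvGoB P ((arr.set l (arr.getD r ' ')).set r (arr.getD l ' ')) (l + 1) (r - 1)
  else arr
termination_by r - l
decreasing_by all_goals omega

def reverse_some_chars_alt (s : String) (chars : List String) : String :=
  String.ofList (pvGoB (pvTargetP chars) s.toList 0 (s.toList.length - 1))

-- ===== PRECONDITION & SPEC =====
def Spec_reverse_some_chars (s : String) (chars : List String) (out : String) : Prop := out = reverse_some_chars_alt s chars
instance (s : String) (chars : List String) (out : String) : Decidable (Spec_reverse_some_chars s chars out) := by unfold Spec_reverse_some_chars; infer_instance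

-- ===== CLAIM (what is proved, stated in full; the proofs are below) =====
def Claim_equal_reverse_some_chars : Prop := ∀ (s : String) (chars : List String), Dom_reverse_some_chars s chars → Spec_reverse_some_chars s chars (reverse_some_chars s chars)

-- ===== LEMMAS AND PROOFS =====

-- canonical form: rebuild s, replacing its target characters in order by the supply ts
def pvMerge (P : Char → Bool) : List Char → List Char → List Char
  | [], _ => []
  | c :: cs, ts =>
    if P c then
      match ts with
      | t :: ts' => t :: pvMerge P cs ts'
      | [] => pvMerge P cs []
    else c :: pvMerge P cs ts

-- the common value both programs compute
def pvSpec (P : Char → Bool) (xs : List Char) : List Char :=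
  pvMerge P xs ((xs.filter P).reverse)

theorem pvGoA_eq_merge (P : Char → Bool) (cs : List Char) :
    ∀ st : List Char, pvGoA P cs st = pvMerge P cs st.reverse := by
  induction cs with
  | nil => intro st; rfl
  | cons c cs ih =>
    intro st
    by_cases hc : P c
    · rcases st.eq_nil_or_concat with rfl | ⟨ys, y, rfl⟩
      · simp [pvGoA, pvMerge, hc, PySem.List.pop?, ih]
      · simp [pvGoA, pvMerge, hc, PySem.List.pop?_last, ih]
    · simp [pvGoA, pvMerge, hc, ih]

theorem pvMerge_length (P : Char → Bool) (cs : List Char) :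
    ∀ ts : List Char, cs.countP P ≤ ts.length → (pvMerge P cs ts).length = cs.length := by
  induction cs with
  | nil => intro ts _; rfl
  | cons c cs ih =>
    intro ts h
    by_cases hc : P c
    · match ts with
      | [] => simp [List.countP_cons, hc] at h
      | t :: ts' =>
        simp only [pvMerge, hc, if_pos, List.length_cons]
        rw [ih ts' (by simp [List.countP_cons, hc] at h; omega)]
    · simp only [pvMerge, hc]
      simp only [Bool.false_eq_true, if_false, List.length_cons]
      rw [ih ts (by simp [List.countP_cons, hc] at h; omega)]

theorem pvMerge_getD (P : Char → Bool) (cs : List Char) :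
    ∀ (ts : List Char) (i : Nat), cs.countP P ≤ ts.length → i < cs.length →
    (pvMerge P cs ts).getD i ' ' =
      if P (cs.getD i ' ') then ts.getD ((cs.take i).countP P) ' ' else cs.getD i ' ' := by
  induction cs with
  | nil => intro ts i _ h; simp at h
  | cons c cs ih =>
    intro ts i h hi
    simp only [pvMerge]
    by_cases hc : P c
    · match ts with
      | [] => simp [List.countP_cons, hc] at h
      | t :: ts' =>
        have h' : cs.countP P ≤ ts'.length := by simp [List.countP_cons, hc] at h; omega
        match i with
        | 0 => simp [hc]
        | i + 1 =>
          simp only [hc, if_true, List.getD_cons_succ]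
          rw [ih ts' i h' (by simpa using hi)]
          by_cases hci : P (cs[i]?.getD ' ')
          · simp [hci, List.take_succ_cons, List.countP_cons, hc, Nat.add_comm,
              List.getElem?_cons_succ, List.getD_cons_succ]
          · simp [hci]
    · simp only [hc, Bool.false_eq_true, if_false]
      match i with
      | 0 => simp [hc]
      | i + 1 =>
        rw [List.getD_cons_succ, ih ts i (by simp [List.countP_cons, hc] at h; omega)
          (by simpa using hi)]
        simp [List.take_succ_cons, List.countP_cons, hc]

theorem pv_len_filter (P : Char → Bool) (xs : List Char) :
    (xs.filter P).length = xs.countP P := List.countP_eq_length_filter.symm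

theorem pvSpec_length (P : Char → Bool) (xs : List Char) :
    (pvSpec P xs).length = xs.length := by
  apply pvMerge_length
  simp [List.length_reverse, pv_len_filter]

-- (xs.filter P) indexed at the number of targets strictly before j gives xs[j]
theorem pv_filter_getD (P : Char → Bool) (xs : List Char) (j : Nat) (hj : j < xs.length)
    (hP : P (xs.getD j ' ')) :
    (xs.filter P).getD ((xs.take j).countP P) ' ' = xs.getD j ' ' := by
  have hsplit : xs.filter P = (xs.take j).filter P ++ (xs.drop j).filter P := by
    rw [← List.filter_append, List.take_append_drop]
  have hdrop : xs.drop j = xs[j] :: xs.drop (j + 1) := List.drop_eq_getElem_cons hj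
  have hget : xs.getD j ' ' = xs[j] := List.getD_eq_getElem xs ' ' hj
  rw [hget] at hP
  have hfil : (xs.drop j).filter P = xs[j] :: (xs.drop (j + 1)).filter P := by
    rw [hdrop, List.filter_cons_of_pos hP]
  have hlen : ((xs.take j).filter P).length = (xs.take j).countP P := by
    simp [pv_len_filter]
  rw [hsplit, hfil, hget]
  rw [List.getD_eq_getElem?_getD, List.getElem?_append_right (by omega)]
  simp [hlen]

theorem pv_cnt_take_succ (P : Char → Bool) (xs : List Char) (i : Nat) (h : i < xs.length) :
    (xs.take (i + 1)).countP P
      = (xs.take i).countP P + (if P (xs.getD i ' ') then 1 else 0) := by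
  rw [List.take_succ, List.countP_append, List.getD_eq_getElem xs ' ' h]
  simp [List.getElem?_eq_getElem h, List.countP_cons]

theorem pv_cnt_drop (P : Char → Bool) (xs : List Char) (i : Nat) (h : i < xs.length) :
    (xs.drop i).countP P
      = (if P (xs.getD i ' ') then 1 else 0) + (xs.drop (i + 1)).countP P := by
  rw [List.drop_eq_getElem_cons h, List.getD_eq_getElem xs ' ' h, List.countP_cons]
  omega

-- split the target count at a middle point, both from the left and from the right
theorem pv_cnt_mid (P : Char → Bool) (xs : List Char) (a b : Nat) (hab : a ≤ b)
    (hb : b ≤ xs.length) :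
    (xs.take b).countP P = (xs.take a).countP P + ((xs.take b).drop a).countP P ∧
    (xs.drop a).countP P = ((xs.take b).drop a).countP P + (xs.drop b).countP P := by
  constructor
  · conv_lhs => rw [← List.take_append_drop a (xs.take b)]
    rw [List.countP_append, List.take_take, Nat.min_eq_left hab]
  · conv_lhs => rw [← List.take_append_drop b xs, List.drop_append]
    have h1 : a - (xs.take b).length = 0 := by simp [List.length_take]; omega
    rw [h1, List.countP_append, List.drop_zero]

theorem pvSpec_getD_not (P : Char → Bool) (xs : List Char) (i : Nat) (hi : i < xs.length)
    (hP : ¬ P (xs.getD i ' ')) : (pvSpec P xs).getD i ' ' = xs.getD i ' ' := by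
  rw [pvSpec, pvMerge_getD P xs _ i (by simp [pv_len_filter]) hi, if_neg hP]

theorem pvSpec_getD_pos (P : Char → Bool) (xs : List Char) (i j : Nat)
    (hi : i < xs.length) (hj : j < xs.length)
    (hPi : P (xs.getD i ' ')) (hPj : P (xs.getD j ' '))
    (hc : (xs.take i).countP P = (xs.drop (j + 1)).countP P) :
    (pvSpec P xs).getD i ' ' = xs.getD j ' ' := by
  set m := xs.countP P with hm
  set k := (xs.take i).countP P with hk
  have hmsplit : m = (xs.take (j + 1)).countP P + (xs.drop (j + 1)).countP P := by
    rw [hm]; conv_lhs => rw [← List.take_append_drop (j + 1) xs]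
    rw [List.countP_append]
  have htj : (xs.take (j + 1)).countP P = (xs.take j).countP P + 1 := by
    rw [pv_cnt_take_succ P xs j hj, if_pos hPj]
  have hmk : m = (xs.take j).countP P + 1 + k := by omega
  have hrevlen : ((xs.filter P).reverse).length = m := by
    simp [pv_len_filter, hm]
  have hkm : k < m := by omega
  rw [pvSpec, pvMerge_getD P xs _ i (by omega) hi, if_pos hPi, ← hk]
  have hkrev : k < ((xs.filter P).reverse).length := by omega
  rw [List.getD_eq_getElem _ ' ' hkrev, List.getElem_reverse]
  have hidx : (xs.filter P).length - 1 - k = (xs.take j).countP P := by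
    simp only [pv_len_filter, ← hm]; omega
  rw [← List.getD_eq_getElem (xs.filter P) ' ', hidx]
  exact pv_filter_getD P xs j hj hPj

theorem pv_ext_getD (a b : List Char) (hl : a.length = b.length)
    (h : ∀ i, i < a.length → a.getD i ' ' = b.getD i ' ') : a = b := by
  apply List.ext_getElem hl
  intro i h1 h2
  have := h i h1
  rwa [List.getD_eq_getElem a ' ' h1, List.getD_eq_getElem b ' ' h2] at this

-- a stopped state of the two-pointer loop already equals the canonical value
theorem pvGoB_final (P : Char → Bool) (xs arr : List Char) (l r : Nat)
    (h0 : arr.length = xs.length) (h2 : r < xs.length) (h3 : l ≤ r + 1) (hlr : ¬ l < r)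
    (h4 : ∀ i, l ≤ i → i ≤ r → arr.getD i ' ' = xs.getD i ' ')
    (h5 : ∀ i, i < xs.length → (i < l ∨ r < i) → arr.getD i ' ' = (pvSpec P xs).getD i ' ')
    (h6 : (xs.take l).countP P = (xs.drop (r + 1)).countP P) :
    arr = pvSpec P xs := by
  apply pv_ext_getD _ _ (by rw [h0, pvSpec_length])
  intro i hi
  rw [h0] at hi
  by_cases hio : i < l ∨ r < i
  · exact h5 i hi hio
  · have hil : i = l := by omega
    rw [h4 i (by omega) (by omega)]
    by_cases hP : P (xs.getD i ' ')
    · refine (pvSpec_getD_pos P xs i i hi hi hP hP ?_).symm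
      have h6' := h6
      rw [show r = l from by omega] at h6'
      rw [hil]
      exact h6'
    · exact (pvSpec_getD_not P xs i hi hP).symm

theorem pvGoB_eq (P : Char → Bool) (xs : List Char) :
    ∀ (d : Nat) (arr : List Char) (l r : Nat), r - l ≤ d →
    arr.length = xs.length → r < xs.length → l ≤ r + 1 →
    (∀ i, l ≤ i → i ≤ r → arr.getD i ' ' = xs.getD i ' ') →
    (∀ i, i < xs.length → (i < l ∨ r < i) → arr.getD i ' ' = (pvSpec P xs).getD i ' ') →
    (xs.take l).countP P = (xs.drop (r + 1)).countP P →
    pvGoB P arr l r = pvSpec P xs := by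
  intro d
  induction d with
  | zero =>
    intro arr l r hd h0 h2 h3 h4 h5 h6
    have hlr : ¬ l < r := by omega
    rw [pvGoB, dif_neg hlr]
    exact pvGoB_final P xs arr l r h0 h2 h3 hlr h4 h5 h6
  | succ d ih =>
    intro arr l r hd h0 h2 h3 h4 h5 h6
    by_cases hlr : l < r
    · rw [pvGoB, dif_pos hlr]
      have hln : l < xs.length := by omega
      have hrn : r < xs.length := h2
      have hal : arr.getD l ' ' = xs.getD l ' ' := h4 l (Nat.le_refl l) (by omega)
      have har : arr.getD r ' ' = xs.getD r ' ' := h4 r (by omega) (Nat.le_refl r)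
      by_cases hPl : P (arr.getD l ' ')
      · by_cases hPr : P (arr.getD r ' ')
        · -- both targets: swap, move both pointers
          rw [if_neg (by simpa using hPl), if_neg (by simpa using hPr)]
          rw [hal] at hPl; rw [har] at hPr
          set arr' := (arr.set l (arr.getD r ' ')).set r (arr.getD l ' ') with harr'
          have hlength' : arr'.length = xs.length := by simp [harr', h0]
          have hlr' : l ≠ r := by omega
          have hgr : arr'.getD r ' ' = arr.getD l ' ' := by
            rw [harr', List.getD_eq_getElem _ ' ' (by simp [h0]; omega), List.getElem_set,
              if_pos rfl]
          have hgl : arr'.getD l ' ' = arr.getD r ' ' := by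
            rw [harr', List.getD_eq_getElem _ ' ' (by simp [h0]; omega), List.getElem_set,
              if_neg (by omega), List.getElem_set, if_pos rfl]
          have hgo : ∀ i, i < xs.length → i ≠ l → i ≠ r → arr'.getD i ' ' = arr.getD i ' ' := by
            intro i hi hil hir
            rw [harr', List.getD_eq_getElem _ ' ' (by simp [h0]; omega), List.getElem_set,
              if_neg (by omega), List.getElem_set, if_neg (by omega)]
            exact (List.getD_eq_getElem arr ' ' (by omega)).symm
          -- the count bookkeeping for the swapped pair
          have hmid := pv_cnt_mid P xs (l + 1) r (by omega) (by omega)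
          have htl : (xs.take (l + 1)).countP P = (xs.take l).countP P + 1 := by
            rw [pv_cnt_take_succ P xs l hln, if_pos hPl]
          have hdr : (xs.drop r).countP P = 1 + (xs.drop (r + 1)).countP P := by
            rw [pv_cnt_drop P xs r hrn, if_pos hPr]
          apply ih arr' (l + 1) (r - 1) (by omega) hlength' (by omega) (by omega)
          · intro i hi1 hi2
            rw [hgo i (by omega) (by omega) (by omega)]
            exact h4 i (by omega) (by omega)
          · intro i hi hio
            by_cases hir : i = r
            · rw [hir, hgr, hal]
              refine (pvSpec_getD_pos P xs r l hrn hln hPr hPl ?_).symm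
              omega
            · by_cases hil : i = l
              · rw [hil, hgl, har]
                exact (pvSpec_getD_pos P xs l r hln hrn hPl hPr h6).symm
              · rw [hgo i hi hil hir]
                exact h5 i hi (by omega)
          · have : r - 1 + 1 = r := by omega
            rw [this, htl]
            omega
        · -- right is not a target: it stays, move right inward
          rw [if_neg (by simpa using hPl), if_pos (by simpa using hPr)]
          rw [har] at hPr
          apply ih arr l (r - 1) (by omega) h0 (by omega) (by omega)
          · intro i hi1 hi2; exact h4 i hi1 (by omega)
          · intro i hi hio
            rcases hio with hio | hio
            · exact h5 i hi (Or.inl hio)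
            · by_cases hir : i = r
              · rw [hir, har]
                exact (pvSpec_getD_not P xs r hrn hPr).symm
              · exact h5 i hi (Or.inr (by omega))
          · have : r - 1 + 1 = r := by omega
            rw [this, pv_cnt_drop P xs r hrn, if_neg hPr]
            omega
      · -- left is not a target: it stays, move left inward
        rw [if_pos (by simpa using hPl)]
        rw [hal] at hPl
        apply ih arr (l + 1) r (by omega) h0 h2 (by omega)
        · intro i hi1 hi2; exact h4 i (by omega) hi2
        · intro i hi hio
          rcases hio with hio | hio
          · by_cases hil : i = l
            · rw [hil, hal]
              exact (pvSpec_getD_not P xs l hln hPl).symm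
            · exact h5 i hi (Or.inl (by omega))
          · exact h5 i hi (Or.inr hio)
        · rw [pv_cnt_take_succ P xs l hln, if_neg hPl]
          omega
    · rw [pvGoB, dif_neg hlr]
      exact pvGoB_final P xs arr l r h0 h2 h3 hlr h4 h5 h6

theorem pvGoB_start (P : Char → Bool) (xs : List Char) :
    pvGoB P xs 0 (xs.length - 1) = pvSpec P xs := by
  match hxs : xs with
  | [] => rw [pvGoB]; rfl
  | c :: cs =>
    apply pvGoB_eq P (c :: cs) (c :: cs).length (c :: cs) 0 ((c :: cs).length - 1)
      (by omega) rfl (by simp) (by simp)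
    · intro i _ _; rfl
    · intro i hi hio
      exfalso
      rcases hio with hio | hio
      · omega
      · simp at hi hio; omega
    · have : (c :: cs).length - 1 + 1 = (c :: cs).length := by simp
      rw [this]
      simp

-- ===== VERDICT (by name: the statement is the Claim_ definition above) =====
theorem reverse_some_chars_spec : Claim_equal_reverse_some_chars := by
  intro s chars _
  unfold Spec_reverse_some_chars reverse_some_chars reverse_some_chars_alt
  rw [pvGoA_eq_merge, pvGoB_start]
  rfl
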